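-- pv_equiv track=rewrite | github.com/cralbers/ATOM | CIS/lab week 6.py | createTempD
-- ===== SOURCE A (Python) =====
-- def createTempD(days, temps):
--     result = {}
--     for key in days:
--         for value in temps:
--             result[key] = value
--             temps.remove(value)
--             break
--
--     return result
-- ===== SOURCE B (Python) =====
-- def createTempD(days, temps):
--     # Indexed single pass plus one bulk slice deletion, instead of a
--     # nested scan with per-element remove.
--     n = min(len(days), len(temps))
--     result = {}
--     for i in range(n):
--         result[days[i]] = temps[i]
--     del temps[:n]
--     return result
-- ===== Notes on version B (the rewrite author's own statement) =====
-- stated objective: faster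
-- what changed: replaces the nested for-loop with per-element temps.remove by a single indexed loop over range(min(len(days),len(temps))) plus one bulk del temps[:n]
import Mathlib
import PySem

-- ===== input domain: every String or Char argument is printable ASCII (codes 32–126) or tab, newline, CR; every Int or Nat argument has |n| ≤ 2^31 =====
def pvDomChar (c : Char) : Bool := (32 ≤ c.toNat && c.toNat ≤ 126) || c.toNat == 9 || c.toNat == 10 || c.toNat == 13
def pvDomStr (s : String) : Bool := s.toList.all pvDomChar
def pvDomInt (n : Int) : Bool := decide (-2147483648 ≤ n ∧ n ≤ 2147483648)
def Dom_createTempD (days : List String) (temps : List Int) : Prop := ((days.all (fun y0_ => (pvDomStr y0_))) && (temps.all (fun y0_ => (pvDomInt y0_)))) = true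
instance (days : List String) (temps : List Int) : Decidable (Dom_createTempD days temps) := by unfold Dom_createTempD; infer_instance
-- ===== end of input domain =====

-- B replaces A's nested loop + per-element remove by one indexed pass; the proved
-- equivalence is about the RETURN value only (both Pythons also pop the first
-- min(len(days),len(temps)) elements of temps; B's `del temps[:n]` matches A's removes).

-- ===== PORT A =====
-- inner `for value in temps: …; break` : take the first element (if any),
-- insert it, and remove its first occurrence (which is the head itself).
def pvStepA (st : PySem.Dict String Int × List Int) (key : String) :
    PySem.Dict String Int × List Int :=
  match st.2 with
  | [] => st
  | v :: _ => (st.1.insert key v, (PySem.List.remove? st.2 v).getD st.2)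

def createTempD (days : List String) (temps : List Int) : List (String × Int) :=
  (days.foldl pvStepA (PySem.Dict.empty, temps)).1.items

-- ===== PORT B =====
def createTempD_alt (days : List String) (temps : List Int) : List (String × Int) :=
  let n : Int := min (days.length : Int) (temps.length : Int)
  -- days[i] / temps[i] with i in range(n): always in range, so getD's default is never used
  ((PySem.List.pyRange 0 n 1).foldl
      (fun (d : PySem.Dict String Int) i =>
        d.insert (PySem.List.pyGetD days i "") (PySem.List.pyGetD temps i 0))
      PySem.Dict.empty).items

-- ===== PRECONDITION & SPEC =====
def Spec_createTempD (days : List String) (temps : List Int) (out : List (String × Int)) : Prop := out = createTempD_alt days temps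
instance (days : List String) (temps : List Int) (out : List (String × Int)) : Decidable (Spec_createTempD days temps out) := by unfold Spec_createTempD; infer_instance

-- ===== CLAIM (what is proved, stated in full; the proofs are below) =====
def Claim_equal_createTempD : Prop := ∀ (days : List String) (temps : List Int), Dom_createTempD days temps → Spec_createTempD days temps (createTempD days temps)

-- ===== LEMMAS AND PROOFS =====

def pvIns (d : PySem.Dict String Int) (kv : String × Int) : PySem.Dict String Int :=
  d.insert kv.1 kv.2

theorem foldA_nil (days : List String) (d : PySem.Dict String Int) :
    days.foldl pvStepA (d, []) = (d, []) := by
  induction days with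
  | nil => rfl
  | cons k ks ih => simpa [pvStepA] using ih

theorem foldA_eq_zip (days : List String) :
    ∀ (temps : List Int) (d : PySem.Dict String Int),
      (days.foldl pvStepA (d, temps)).1 = (days.zip temps).foldl pvIns d := by
  induction days with
  | nil => intro temps d; rfl
  | cons k ks ih =>
    intro temps d
    cases temps with
    | nil =>
      simp only [List.foldl_cons]
      rw [show pvStepA (d, []) k = (d, []) from rfl, foldA_nil]
      rfl
    | cons v ts =>
      have hstep : pvStepA (d, v :: ts) k = (d.insert k v, ts) := by
        simp [pvStepA]
      simp only [List.foldl_cons, hstep, ih, List.zip_cons_cons, pvIns]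

theorem foldB_eq_zip (days : List String) (temps : List Int) :
    (PySem.List.pyRange 0 (min (days.length : Int) (temps.length : Int)) 1).foldl
        (fun (d : PySem.Dict String Int) i =>
          d.insert (PySem.List.pyGetD days i "") (PySem.List.pyGetD temps i 0))
        PySem.Dict.empty
      = (days.zip temps).foldl pvIns PySem.Dict.empty := by
  have hlen : min (days.length : Int) (temps.length : Int)
      = ((days.zip temps).length : Int) := by
    simp [List.length_zip]
  rw [hlen]
  have hcongr :
      ∀ (d : PySem.Dict String Int) (i : Int),
        i ∈ PySem.List.pyRange 0 ((days.zip temps).length : Int) 1 →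
        d.insert (PySem.List.pyGetD days i "") (PySem.List.pyGetD temps i 0)
          = pvIns d (PySem.List.pyGetD (days.zip temps) i ("", 0)) := by
    intro d i hi
    rw [PySem.List.mem_pyRange_one] at hi
    obtain ⟨h0, hlt⟩ := hi
    have hz : i < ((days.zip temps).length : Int) := hlt
    have hd : i < (days.length : Int) := by
      simp [List.length_zip] at hz; omega
    have ht : i < (temps.length : Int) := by
      simp [List.length_zip] at hz; omega
    rw [PySem.List.pyGetD_eq_getElem days "" h0 hd,
        PySem.List.pyGetD_eq_getElem temps 0 h0 ht,
        PySem.List.pyGetD_eq_getElem (days.zip temps) ("", 0) h0 hz]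
    simp [pvIns, List.getElem_zip]
  calc
    (PySem.List.pyRange 0 ((days.zip temps).length : Int) 1).foldl
        (fun (d : PySem.Dict String Int) i =>
          d.insert (PySem.List.pyGetD days i "") (PySem.List.pyGetD temps i 0))
        PySem.Dict.empty
      = (PySem.List.pyRange 0 ((days.zip temps).length : Int) 1).foldl
          (fun (d : PySem.Dict String Int) i =>
            pvIns d (PySem.List.pyGetD (days.zip temps) i ("", 0)))
          PySem.Dict.empty :=
        PySem.List.foldl_congr_mem _ _ _ _ (fun acc i hi => hcongr acc i hi)
    _ = (days.zip temps).foldl pvIns PySem.Dict.empty :=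
        PySem.List.foldl_pyRange_zero_pyGetD' (days.zip temps) ("", 0) pvIns PySem.Dict.empty

-- ===== VERDICT (by name: the statement is the Claim_ definition above) =====
theorem createTempD_spec : Claim_equal_createTempD := by
  intro days temps _
  show createTempD days temps = createTempD_alt days temps
  unfold createTempD createTempD_alt
  simp only [foldA_eq_zip, foldB_eq_zip]
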